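-- pv_equiv track=rewrite | github.com/denizcetiner/rosalindpractice | MRNA.py | get_possible_rna_count
-- ===== SOURCE A (Python) =====
-- def get_possible_rnas(protein_codons=[]):
--     rna_possibilities = []
--     possibility_count = 1
--     for codons in protein_codons:
--         possibility_count *= len(codons)
--
--     for codon_counter in range(possibility_count):
--         rna_possibility = []
--         modulus = 1
--         for codons in protein_codons:
--             modulus = len(codons)
--             codon = codons[codon_counter % modulus]
--             rna_possibility.append(codon)
--         rna_possibilities.append(rna_possibility)
--     return rna_possibilities
--
-- def get_possible_rna_count(possible_codons=[], fast=True):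
--     modulus = 1000000
--     possible_rna_count = 0
--     if fast:
--         possible_rna_count = 1
--         for codons in possible_codons:
--             possible_rna_count = (possible_rna_count * len(codons)) % modulus
--     else:
--         possible_rnas = get_possible_rnas(possible_codons)
--         possible_rna_count = len(possible_rnas)
--
--     return possible_rna_count
-- ===== SOURCE B (Python) =====
-- def get_possible_rna_count(possible_codons=[], fast=True):
--     total = 1
--     for codons in possible_codons:
--         total *= len(codons)
--     return total % 1000000 if fast else total
-- ===== Notes on version B (the rewrite author's own statement) =====
-- stated objective: simpler
-- what changed: B multiplies the codon-group sizes in one pass (applying mod 1000000 once at the end when fast) instead of materialising the full Cartesian product of codon choices on the slow path and taking its length.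
import Mathlib
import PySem

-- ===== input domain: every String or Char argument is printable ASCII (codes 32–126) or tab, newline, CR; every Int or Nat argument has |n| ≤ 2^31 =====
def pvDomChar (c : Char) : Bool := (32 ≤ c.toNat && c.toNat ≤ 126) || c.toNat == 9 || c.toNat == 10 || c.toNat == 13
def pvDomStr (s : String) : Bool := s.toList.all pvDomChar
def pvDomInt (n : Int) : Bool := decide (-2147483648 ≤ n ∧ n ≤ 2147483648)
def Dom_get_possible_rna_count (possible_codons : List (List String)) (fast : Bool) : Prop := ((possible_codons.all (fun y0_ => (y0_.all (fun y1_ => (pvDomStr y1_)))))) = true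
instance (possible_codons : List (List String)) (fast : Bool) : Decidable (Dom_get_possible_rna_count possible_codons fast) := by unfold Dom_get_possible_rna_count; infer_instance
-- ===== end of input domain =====

-- B replaces A's slow-path enumeration of every RNA string with a single product of the
-- codon-group sizes (mod applied once at the end when fast): simpler, one pass.

-- ===== PORT A =====
-- helper: literal port of get_possible_rnas (the codons[...] index is always in range when the
-- outer range is nonempty, so the total pyGetD with default "" is exact there)
def pv_get_possible_rnas (protein_codons : List (List String)) : List (List String) :=
  let possibility_count : Int :=
    protein_codons.foldl (fun acc codons => acc * (codons.length : Int)) 1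
  (PySem.List.pyRange 0 possibility_count 1).map (fun codon_counter =>
    protein_codons.foldl (fun rna codons =>
      rna ++ [PySem.List.pyGetD codons (PySem.Int.mod codon_counter (codons.length : Int)) ""]) [])

def get_possible_rna_count (possible_codons : List (List String)) (fast : Bool) : Int :=
  if fast then
    possible_codons.foldl
      (fun acc codons => PySem.Int.mod (acc * (codons.length : Int)) 1000000) 1
  else
    ((pv_get_possible_rnas possible_codons).length : Int)

-- ===== PORT B =====
def get_possible_rna_count_alt (possible_codons : List (List String)) (fast : Bool) : Int :=
  let total := possible_codons.foldl (fun acc codons => acc * (codons.length : Int)) 1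
  if fast then PySem.Int.mod total 1000000 else total

-- ===== PRECONDITION & SPEC =====
def Spec_get_possible_rna_count (possible_codons : List (List String)) (fast : Bool) (out : Int) : Prop := out = get_possible_rna_count_alt possible_codons fast
instance (possible_codons : List (List String)) (fast : Bool) (out : Int) : Decidable (Spec_get_possible_rna_count possible_codons fast out) := by unfold Spec_get_possible_rna_count; infer_instance

-- ===== CLAIM (what is proved, stated in full; the proofs are below) =====
def Claim_equal_get_possible_rna_count : Prop := ∀ (possible_codons : List (List String)) (fast : Bool), Dom_get_possible_rna_count possible_codons fast → Spec_get_possible_rna_count possible_codons fast (get_possible_rna_count possible_codons fast)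

-- ===== LEMMAS AND PROOFS =====

-- the running product of lengths is nonnegative
lemma pv_prod_nonneg (l : List (List String)) (a : Int) (ha : 0 ≤ a) :
    0 ≤ l.foldl (fun acc codons => acc * (codons.length : Int)) a := by
  induction l generalizing a with
  | nil => exact ha
  | cons c t ih =>
    exact ih _ (mul_nonneg ha (Int.natCast_nonneg _))

-- taking the modulus at every step equals taking it once at the end
lemma pv_mod_foldl (l : List (List String)) (a : Int) :
    l.foldl (fun acc codons => PySem.Int.mod (acc * (codons.length : Int)) 1000000)
      (PySem.Int.mod a 1000000)
    = PySem.Int.mod (l.foldl (fun acc codons => acc * (codons.length : Int)) a) 1000000 := by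
  induction l generalizing a with
  | nil => rfl
  | cons c t ih =>
    simp only [List.foldl_cons]
    rw [← ih (a * (c.length : Int))]
    congr 1
    simp only [PySem.Int.mod_eq_emod_of_pos (by norm_num : (0:Int) < 1000000)]
    rw [Int.mul_emod, Int.emod_emod_of_dvd _ dvd_rfl, ← Int.mul_emod]

-- ===== VERDICT (by name: the statement is the Claim_ definition above) =====
theorem get_possible_rna_count_spec : Claim_equal_get_possible_rna_count := by
  intro pc fast _
  show get_possible_rna_count pc fast = get_possible_rna_count_alt pc fast
  cases fast with
  | true =>
    simp only [get_possible_rna_count, get_possible_rna_count_alt, if_true]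
    have h1 : (PySem.Int.mod 1 1000000) = 1 := by decide
    conv_lhs => rw [← h1]
    rw [pv_mod_foldl]
  | false =>
    simp only [get_possible_rna_count, get_possible_rna_count_alt, pv_get_possible_rnas,
      Bool.false_eq_true, if_false]
    rw [List.length_map, PySem.List.length_pyRange_one]
    have h0 : (0 : Int) ≤ pc.foldl (fun acc codons => acc * (codons.length : Int)) 1 :=
      pv_prod_nonneg pc 1 (by norm_num)
    omega
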